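-- pv_equiv track=rewrite | github.com/pedruino/pedroclaw | src/pedroclaw/gitlab/client.py | find_nearest_valid_line
-- ===== SOURCE A (Python) =====
-- def find_nearest_valid_line(target_line: int, valid_lines: set[int]) -> int | None:
--     """Find the nearest valid diff line to the target, within 5 lines."""
--     if target_line in valid_lines:
--         return target_line
--     for offset in range(1, 6):
--         if target_line + offset in valid_lines:
--             return target_line + offset
--         if target_line - offset in valid_lines:
--             return target_line - offset
--     return None
-- ===== SOURCE B (Python) =====
-- def find_nearest_valid_line(target_line: int, valid_lines: set[int]) -> int | None:
--     """Find the nearest valid diff line to the target, within 5 lines.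
--
--     Single pass over valid_lines keeping the best candidate by the key
--     (distance, prefer-line-at-or-above-target), instead of probing 11
--     fixed positions against the set.
--     """
--     best = None
--     for l in valid_lines:
--         d = abs(l - target_line)
--         if d > 5:
--             continue
--         if best is None:
--             best = l
--         else:
--             db = abs(best - target_line)
--             if d < db or (d == db and l >= target_line and best < target_line):
--                 best = l
--     return best
-- ===== Notes on version B (the rewrite author's own statement) =====
-- stated objective: alternative
-- what changed: Instead of probing the 11 fixed candidate positions target, target+1, target-1, ..., target+5, target-5 against the set, B makes one pass over valid_lines itself, keeping the best in-range line under the key (distance, prefer l >= target), which breaks ties exactly as A's +offset-first probing does.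
import Mathlib
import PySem

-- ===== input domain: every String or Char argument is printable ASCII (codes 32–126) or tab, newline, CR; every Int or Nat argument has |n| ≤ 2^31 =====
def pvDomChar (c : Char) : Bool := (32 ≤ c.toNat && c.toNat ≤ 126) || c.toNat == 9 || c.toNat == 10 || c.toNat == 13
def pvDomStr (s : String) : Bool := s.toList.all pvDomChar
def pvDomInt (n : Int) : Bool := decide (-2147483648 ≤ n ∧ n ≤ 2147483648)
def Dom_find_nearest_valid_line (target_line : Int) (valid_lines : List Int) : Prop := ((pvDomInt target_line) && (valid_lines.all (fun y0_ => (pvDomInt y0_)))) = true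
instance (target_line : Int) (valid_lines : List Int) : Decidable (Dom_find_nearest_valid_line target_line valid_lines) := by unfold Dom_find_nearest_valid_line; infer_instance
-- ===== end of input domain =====

-- B replaces A's 11 fixed-position probes with one pass over valid_lines keeping the best
-- in-range line under the key (distance, prefer l >= target); same return value, proved equal.


-- ===== PORT A =====
-- the 'for offset in range(1, 6)' loop with its two early returns
def findLoopA (target_line : Int) (valid_lines : List Int) : List Int → Option Int
  | [] => none
  | offset :: rest =>
    if target_line + offset ∈ valid_lines then some (target_line + offset)
    else if target_line - offset ∈ valid_lines then some (target_line - offset)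
    else findLoopA target_line valid_lines rest

def find_nearest_valid_line (target_line : Int) (valid_lines : List Int) : Option Int :=
  if target_line ∈ valid_lines then some target_line
  else findLoopA target_line valid_lines (PySem.List.pyRange 1 6 1)

-- ===== PORT B =====
-- one iteration of B's loop body
def stepB (target_line l : Int) (best : Option Int) : Option Int :=
  let d := |l - target_line|
  if d > 5 then best
  else
    match best with
    | none => some l
    | some b =>
      let db := |b - target_line|
      if d < db ∨ (d = db ∧ l ≥ target_line ∧ b < target_line) then some l else best

def find_nearest_valid_line_alt (target_line : Int) (valid_lines : List Int) : Option Int :=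
  valid_lines.foldl (fun best l => stepB target_line l best) none

-- ===== PRECONDITION & SPEC =====
def Spec_find_nearest_valid_line (target_line : Int) (valid_lines : List Int) (out : Option Int) : Prop := out = find_nearest_valid_line_alt target_line valid_lines
instance (target_line : Int) (valid_lines : List Int) (out : Option Int) : Decidable (Spec_find_nearest_valid_line target_line valid_lines out) := by unfold Spec_find_nearest_valid_line; infer_instance

-- ===== CLAIM (what is proved, stated in full; the proofs are below) =====
def Claim_equal_find_nearest_valid_line : Prop := ∀ (target_line : Int) (valid_lines : List Int), Dom_find_nearest_valid_line target_line valid_lines → Spec_find_nearest_valid_line target_line valid_lines (find_nearest_valid_line target_line valid_lines)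

-- ===== LEMMAS AND PROOFS =====

-- helper: convert absences from A's probes into disequalities for the fold's winner
lemma ne_of_not_mem {b x : Int} {vl : List Int} (hb : b ∈ vl) (hx : x ∉ vl) : b ≠ x :=
  fun e => hx (e ▸ hb)

def keyLe (t a b : Int) : Prop :=
  |a - t| < |b - t| ∨ (|a - t| = |b - t| ∧ (t ≤ a ∨ b < t))

lemma keyLe_trans {t a b c : Int} (h1 : keyLe t a b) (h2 : keyLe t b c) : keyLe t a c := by
  simp only [keyLe, Int.abs_eq_natAbs] at *; omega

lemma pyRange16 : PySem.List.pyRange 1 6 1 = [1, 2, 3, 4, 5] := by decide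

lemma foldB_none (t : Int) (xs : List Int) (acc : Option Int)
    (h : xs.foldl (fun best l => stepB t l best) acc = none) :
    acc = none ∧ ∀ l ∈ xs, ¬ (|l - t| ≤ 5) := by
  induction xs generalizing acc with
  | nil => simp only [List.foldl_nil] at h; exact ⟨h, by simp⟩
  | cons x rest ih =>
    simp only [List.foldl_cons] at h
    obtain ⟨hacc', hrest⟩ := ih _ h
    by_cases hd : |x - t| > 5
    · have : acc = none := by
        cases acc with
        | none => rfl
        | some a => simp [stepB, if_pos hd] at hacc'
      refine ⟨this, ?_⟩
      intro l hl
      rcases List.mem_cons.mp hl with rfl | hl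
      · omega
      · exact hrest l hl
    · exfalso
      cases acc with
      | none => simp [stepB, hd] at hacc'
      | some a =>
        simp only [stepB, if_neg hd] at hacc'
        split at hacc' <;> simp at hacc'

lemma foldB_some (t : Int) (xs : List Int) (acc : Option Int) (b : Int)
    (hacc : ∀ a, acc = some a → |a - t| ≤ 5)
    (h : xs.foldl (fun best l => stepB t l best) acc = some b) :
    (acc = some b ∨ (b ∈ xs ∧ |b - t| ≤ 5)) ∧
    (∀ l ∈ xs, |l - t| ≤ 5 → keyLe t b l) ∧
    (∀ a, acc = some a → keyLe t b a) := by
  induction xs generalizing acc with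
  | nil =>
    simp only [List.foldl_nil] at h
    refine ⟨Or.inl h, by simp, ?_⟩
    intro a ha; rw [h] at ha
    cases ha
    simp only [keyLe]
    exact Or.inr ⟨trivial, by omega⟩
  | cons x rest ih =>
    simp only [List.foldl_cons] at h
    by_cases hd : |x - t| > 5
    · have hstep : stepB t x acc = acc := by
        cases acc with
        | none => simp [stepB, if_pos hd]
        | some a => simp [stepB, if_pos hd]
      rw [hstep] at h
      obtain ⟨h1, h2, h3⟩ := ih acc hacc h
      refine ⟨?_, ?_, h3⟩
      · rcases h1 with h1 | ⟨hm, hg⟩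
        · exact Or.inl h1
        · exact Or.inr ⟨List.mem_cons_of_mem _ hm, hg⟩
      · intro l hl hgl
        rcases List.mem_cons.mp hl with rfl | hl
        · omega
        · exact h2 l hl hgl
    · rw [not_lt] at hd
      cases acc with
      | none =>
        have hstep : stepB t x none = some x := by
          simp [stepB]; omega
        rw [hstep] at h
        have hacc' : ∀ a, some x = some a → |a - t| ≤ 5 := by
          intro a ha; cases ha; exact hd
        obtain ⟨h1, h2, h3⟩ := ih (some x) hacc' h
        have hbx : keyLe t b x := h3 x rfl
        refine ⟨?_, ?_, by intro a ha; simp at ha⟩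
        · rcases h1 with h1 | ⟨hm, hg⟩
          · cases h1; exact Or.inr ⟨by simp, hd⟩
          · exact Or.inr ⟨List.mem_cons_of_mem _ hm, hg⟩
        · intro l hl hgl
          rcases List.mem_cons.mp hl with rfl | hl
          · exact hbx
          · exact h2 l hl hgl
      | some a =>
        have hga : |a - t| ≤ 5 := hacc a rfl
        by_cases hc : |x - t| < |a - t| ∨ (|x - t| = |a - t| ∧ x ≥ t ∧ a < t)
        · have hstep : stepB t x (some a) = some x := by
            simp only [stepB]
            rw [if_neg (by omega), if_pos hc]
          rw [hstep] at h
          have hacc' : ∀ a', some x = some a' → |a' - t| ≤ 5 := by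
            intro a' ha'; cases ha'; exact hd
          obtain ⟨h1, h2, h3⟩ := ih (some x) hacc' h
          have hbx : keyLe t b x := h3 x rfl
          have hxa : keyLe t x a := by
            simp only [keyLe, Int.abs_eq_natAbs] at *; omega
          refine ⟨?_, ?_, ?_⟩
          · rcases h1 with h1 | ⟨hm, hg⟩
            · cases h1; exact Or.inr ⟨by simp, hd⟩
            · exact Or.inr ⟨List.mem_cons_of_mem _ hm, hg⟩
          · intro l hl hgl
            rcases List.mem_cons.mp hl with rfl | hl
            · exact hbx
            · exact h2 l hl hgl
          · intro a' ha'; cases ha'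
            exact keyLe_trans hbx hxa
        · have hstep : stepB t x (some a) = some a := by
            simp only [stepB]
            rw [if_neg (by omega), if_neg hc]
          rw [hstep] at h
          have hacc2 : ∀ a', (some a : Option Int) = some a' → |a' - t| ≤ 5 := by
            intro a' ha'; cases ha'; exact hga
          obtain ⟨h1, h2, h3⟩ := ih (some a) hacc2 h
          have hba : keyLe t b a := h3 a rfl
          have hax : keyLe t a x := by
            simp only [keyLe, Int.abs_eq_natAbs] at *
            omega
          refine ⟨?_, ?_, ?_⟩
          · rcases h1 with h1 | ⟨hm, hg⟩
            · cases h1; exact Or.inl rfl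
            · exact Or.inr ⟨List.mem_cons_of_mem _ hm, hg⟩
          · intro l hl hgl
            rcases List.mem_cons.mp hl with rfl | hl
            · exact keyLe_trans hba hax
            · exact h2 l hl hgl
          · intro a' ha'; cases ha'; exact hba

lemma absP (t k : Int) (h1 : 0 ≤ k) (h2 : k ≤ 5) : |(t + k) - t| ≤ 5 := by
  rw [show (t + k) - t = k by ring]; exact abs_le.mpr ⟨by omega, h2⟩

lemma absM (t k : Int) (h1 : 0 ≤ k) (h2 : k ≤ 5) : |(t - k) - t| ≤ 5 := by
  rw [show (t - k) - t = -k by ring]; exact abs_le.mpr ⟨by omega, by omega⟩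

lemma abs0 (t : Int) : |t - t| ≤ 5 := by
  rw [sub_self]; exact abs_le.mpr ⟨by omega, by omega⟩

-- ===== VERDICT (by name: the statement is the Claim_ definition above) =====
set_option maxHeartbeats 4000000 in
theorem find_nearest_valid_line_spec : Claim_equal_find_nearest_valid_line := by
  intro t vl _
  unfold Spec_find_nearest_valid_line find_nearest_valid_line find_nearest_valid_line_alt
  cases halt : vl.foldl (fun best l => stepB t l best) (none : Option Int) with
  | none =>
    obtain ⟨-, hno⟩ := foldB_none t vl none halt
    rw [pyRange16]
    simp only [findLoopA]
    split_ifs with h0 h1 h2 h3 h4 h5 h6 h7 h8 h9 h10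
    · exact absurd (abs0 t) (hno _ h0)
    · exact absurd (absP t 1 (by omega) (by omega)) (hno _ h1)
    · exact absurd (absM t 1 (by omega) (by omega)) (hno _ h2)
    · exact absurd (absP t 2 (by omega) (by omega)) (hno _ h3)
    · exact absurd (absM t 2 (by omega) (by omega)) (hno _ h4)
    · exact absurd (absP t 3 (by omega) (by omega)) (hno _ h5)
    · exact absurd (absM t 3 (by omega) (by omega)) (hno _ h6)
    · exact absurd (absP t 4 (by omega) (by omega)) (hno _ h7)
    · exact absurd (absM t 4 (by omega) (by omega)) (hno _ h8)
    · exact absurd (absP t 5 (by omega) (by omega)) (hno _ h9)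
    · exact absurd (absM t 5 (by omega) (by omega)) (hno _ h10)
    · rfl
  | some b =>
    obtain ⟨hh, hmin, -⟩ := foldB_some t vl none b (by intro a ha; simp at ha) halt
    rcases hh with hh | ⟨hmem, hgood⟩
    · simp at hh
    rw [pyRange16]
    simp only [findLoopA]
    simp only [Int.abs_eq_natAbs] at hgood
    split_ifs with h0 h1 h2 h3 h4 h5 h6 h7 h8 h9 h10
    · have hk := hmin _ h0 (abs0 t)
      simp only [keyLe, Int.abs_eq_natAbs] at hk
      congr 1
      omega
    · have hk := hmin _ h1 (absP t 1 (by omega) (by omega))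
      have e0 := ne_of_not_mem hmem h0
      simp only [keyLe, Int.abs_eq_natAbs] at hk
      congr 1
      omega
    · have hk := hmin _ h2 (absM t 1 (by omega) (by omega))
      have e0 := ne_of_not_mem hmem h0
      have e1 := ne_of_not_mem hmem h1
      simp only [keyLe, Int.abs_eq_natAbs] at hk
      congr 1
      omega
    · have hk := hmin _ h3 (absP t 2 (by omega) (by omega))
      have e0 := ne_of_not_mem hmem h0
      have e1 := ne_of_not_mem hmem h1
      have e2 := ne_of_not_mem hmem h2
      simp only [keyLe, Int.abs_eq_natAbs] at hk
      congr 1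
      omega
    · have hk := hmin _ h4 (absM t 2 (by omega) (by omega))
      have e0 := ne_of_not_mem hmem h0
      have e1 := ne_of_not_mem hmem h1
      have e2 := ne_of_not_mem hmem h2
      have e3 := ne_of_not_mem hmem h3
      simp only [keyLe, Int.abs_eq_natAbs] at hk
      congr 1
      omega
    · have hk := hmin _ h5 (absP t 3 (by omega) (by omega))
      have e0 := ne_of_not_mem hmem h0
      have e1 := ne_of_not_mem hmem h1
      have e2 := ne_of_not_mem hmem h2
      have e3 := ne_of_not_mem hmem h3
      have e4 := ne_of_not_mem hmem h4
      simp only [keyLe, Int.abs_eq_natAbs] at hk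
      congr 1
      omega
    · have hk := hmin _ h6 (absM t 3 (by omega) (by omega))
      have e0 := ne_of_not_mem hmem h0
      have e1 := ne_of_not_mem hmem h1
      have e2 := ne_of_not_mem hmem h2
      have e3 := ne_of_not_mem hmem h3
      have e4 := ne_of_not_mem hmem h4
      have e5 := ne_of_not_mem hmem h5
      simp only [keyLe, Int.abs_eq_natAbs] at hk
      congr 1
      omega
    · have hk := hmin _ h7 (absP t 4 (by omega) (by omega))
      have e0 := ne_of_not_mem hmem h0
      have e1 := ne_of_not_mem hmem h1
      have e2 := ne_of_not_mem hmem h2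
      have e3 := ne_of_not_mem hmem h3
      have e4 := ne_of_not_mem hmem h4
      have e5 := ne_of_not_mem hmem h5
      have e6 := ne_of_not_mem hmem h6
      simp only [keyLe, Int.abs_eq_natAbs] at hk
      congr 1
      omega
    · have hk := hmin _ h8 (absM t 4 (by omega) (by omega))
      have e0 := ne_of_not_mem hmem h0
      have e1 := ne_of_not_mem hmem h1
      have e2 := ne_of_not_mem hmem h2
      have e3 := ne_of_not_mem hmem h3
      have e4 := ne_of_not_mem hmem h4
      have e5 := ne_of_not_mem hmem h5
      have e6 := ne_of_not_mem hmem h6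
      have e7 := ne_of_not_mem hmem h7
      simp only [keyLe, Int.abs_eq_natAbs] at hk
      congr 1
      omega
    · have hk := hmin _ h9 (absP t 5 (by omega) (by omega))
      have e0 := ne_of_not_mem hmem h0
      have e1 := ne_of_not_mem hmem h1
      have e2 := ne_of_not_mem hmem h2
      have e3 := ne_of_not_mem hmem h3
      have e4 := ne_of_not_mem hmem h4
      have e5 := ne_of_not_mem hmem h5
      have e6 := ne_of_not_mem hmem h6
      have e7 := ne_of_not_mem hmem h7
      have e8 := ne_of_not_mem hmem h8
      simp only [keyLe, Int.abs_eq_natAbs] at hk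
      congr 1
      omega
    · have hk := hmin _ h10 (absM t 5 (by omega) (by omega))
      have e0 := ne_of_not_mem hmem h0
      have e1 := ne_of_not_mem hmem h1
      have e2 := ne_of_not_mem hmem h2
      have e3 := ne_of_not_mem hmem h3
      have e4 := ne_of_not_mem hmem h4
      have e5 := ne_of_not_mem hmem h5
      have e6 := ne_of_not_mem hmem h6
      have e7 := ne_of_not_mem hmem h7
      have e8 := ne_of_not_mem hmem h8
      have e9 := ne_of_not_mem hmem h9
      simp only [keyLe, Int.abs_eq_natAbs] at hk
      congr 1
      omega
    · exfalso
      have e0 := ne_of_not_mem hmem h0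
      have e1 := ne_of_not_mem hmem h1
      have e2 := ne_of_not_mem hmem h2
      have e3 := ne_of_not_mem hmem h3
      have e4 := ne_of_not_mem hmem h4
      have e5 := ne_of_not_mem hmem h5
      have e6 := ne_of_not_mem hmem h6
      have e7 := ne_of_not_mem hmem h7
      have e8 := ne_of_not_mem hmem h8
      have e9 := ne_of_not_mem hmem h9
      have e10 := ne_of_not_mem hmem h10
      omega
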